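-- pv_equiv track=rewrite | github.com/Parables/ufcfvq-assignment | fr8.py | get_table_body
-- ===== SOURCE A (Python) =====
-- def get_table_body(statColumns, statData):
--     # result = { r: [r] for (i,r) in enumerate(startColumns)}
--     result = []
--     for (firstCellIndex, firstCell) in enumerate(statColumns):
--         row = [firstCell]
--         for (cellIndex, cell) in enumerate(statData):
--             row += [statData[cell][firstCellIndex]]
--         result += [row]
--     return result
-- ===== SOURCE B (Python) =====
-- def get_table_body(statColumns, statData):
--     # Loop interchange: start each row with its column label, then sweep
--     # statData once, extending every row with that entry's value for its column.
--     result = [[firstCell] for firstCell in statColumns]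
--     for key in statData:
--         vals = statData[key]
--         result = [row + [vals[i]] for i, row in enumerate(result)]
--     return result
-- ===== Notes on version B (the rewrite author's own statement) =====
-- stated objective: alternative
-- what changed: Interchanged the loop nesting: B seeds one row per column and then makes a single outer sweep over statData, extending every partially-built row, instead of A's per-column inner rescans of statData.
import Mathlib
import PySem

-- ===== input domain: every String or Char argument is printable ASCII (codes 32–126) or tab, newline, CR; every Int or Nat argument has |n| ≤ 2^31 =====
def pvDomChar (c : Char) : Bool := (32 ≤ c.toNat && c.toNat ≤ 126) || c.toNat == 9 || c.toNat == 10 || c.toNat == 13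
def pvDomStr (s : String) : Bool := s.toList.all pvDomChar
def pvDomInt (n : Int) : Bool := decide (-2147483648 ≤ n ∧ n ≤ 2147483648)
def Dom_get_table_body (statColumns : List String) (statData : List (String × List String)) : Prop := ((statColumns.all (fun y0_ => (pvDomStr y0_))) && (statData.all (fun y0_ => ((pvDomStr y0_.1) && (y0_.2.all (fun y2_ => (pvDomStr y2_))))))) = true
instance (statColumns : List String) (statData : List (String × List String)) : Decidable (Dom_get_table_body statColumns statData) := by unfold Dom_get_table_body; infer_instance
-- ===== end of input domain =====

-- B interchanges the loop nesting: one outer sweep over statData extends every row, instead of A's per-column rescans (objective: alternative).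

-- ===== PORT A =====
-- For each (i, firstCell) in enumerate(statColumns), build [firstCell] then append
-- statData[cell][i] for each cell of statData; dict lookup = PySem.Dict.getD, list
-- index = pyGetD (defaults never reached under Pre_, where Python would raise IndexError).
def get_table_body (statColumns : List String) (statData : List (String × List String)) : List (List String) :=
  (PySem.List.enumerate statColumns).foldl
    (fun result fc =>
      result ++ [ (PySem.List.enumerate statData).foldl
          (fun row c =>
            row ++ [PySem.List.pyGetD ((PySem.Dict.mk statData).getD c.2.1 []) fc.1 ""])
          [fc.2] ])
    []

-- ===== PORT B =====
-- result = [[c] for c in statColumns]; for key in statData: result = [row + [vals[i]] for i, row in enumerate(result)]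
def get_table_body_alt (statColumns : List String) (statData : List (String × List String)) : List (List String) :=
  statData.foldl
    (fun result p =>
      let vals := (PySem.Dict.mk statData).getD p.1 []
      (PySem.List.enumerate result).map (fun q => q.2 ++ [PySem.List.pyGetD vals q.1 ""]))
    (statColumns.map (fun c => [c]))

-- ===== PRECONDITION & SPEC =====
-- statData is a Python dict, so its keys are distinct; A raises IndexError when some
-- value list is shorter than statColumns, so such inputs are excluded.
def Pre_get_table_body (statColumns : List String) (statData : List (String × List String)) : Prop :=
  (statData.map (·.1)).Nodup ∧ ∀ p ∈ statData, statColumns.length ≤ p.2.length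
instance (statColumns : List String) (statData : List (String × List String)) : Decidable (Pre_get_table_body statColumns statData) := by unfold Pre_get_table_body; infer_instance
def pvWitness_get_table_body : List String × (List (String × List String)) := (["a", "b"], [("k", ["1", "2"]), ("m", ["3", "4"])])

def Spec_get_table_body (statColumns : List String) (statData : List (String × List String)) (out : List (List String)) : Prop := out = get_table_body_alt statColumns statData
instance (statColumns : List String) (statData : List (String × List String)) (out : List (List String)) : Decidable (Spec_get_table_body statColumns statData out) := by unfold Spec_get_table_body; infer_instance

-- ===== CLAIM (what is proved, stated in full; the proofs are below) =====
def Claim_equal_get_table_body : Prop := ∀ (statColumns : List String) (statData : List (String × List String)), Dom_get_table_body statColumns statData → Pre_get_table_body statColumns statData → Spec_get_table_body statColumns statData (get_table_body statColumns statData)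

-- ===== LEMMAS AND PROOFS =====

-- mapping a function of the element over enumerate drops the index
theorem map_over_enum_snd {a b : Type} (g : a → b) (xs : List a) (s : Int) :
    (PySem.List.enumerate xs s).map (fun c => g c.2) = xs.map g := by
  induction xs generalizing s with
  | nil => simp [PySem.List.enumerate_nil]
  | cons x xs ih => simp [PySem.List.enumerate_cons, ih]

-- re-enumerating rows built from enumerate reproduces the original indices
theorem enum_map_aligned (xs : List String) (s : Int) (g : Int × String → List String)
    (F : Int → String) :
    (PySem.List.enumerate ((PySem.List.enumerate xs s).map g) s).map (fun q => q.2 ++ [F q.1])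
      = (PySem.List.enumerate xs s).map (fun fc => g fc ++ [F fc.1]) := by
  induction xs generalizing s g with
  | nil => simp [PySem.List.enumerate_nil]
  | cons x xs ih => simp [PySem.List.enumerate_cons, ih]

-- characterisation of A's result
theorem getA_eq (statColumns : List String) (statData : List (String × List String)) :
    get_table_body statColumns statData =
      (PySem.List.enumerate statColumns).map
        (fun fc => fc.2 :: statData.map
          (fun p => PySem.List.pyGetD ((PySem.Dict.mk statData).getD p.1 []) fc.1 "")) := by
  unfold get_table_body
  rw [PySem.List.foldl_append_singleton_eq_map]
  simp only [List.nil_append]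
  refine List.map_congr_left (fun fc _ => ?_)
  rw [PySem.List.foldl_append_singleton_eq_map]
  simp only [map_over_enum_snd (fun p => PySem.List.pyGetD ((PySem.Dict.mk statData).getD p.1 []) fc.1 "") statData 0]
  simp

-- B's fold invariant: after consuming ds, every row carries the values of us ++ ds
theorem getB_invariant (statData : List (String × List String)) (statColumns : List String)
    (ds us : List (String × List String)) :
    ds.foldl
      (fun result p =>
        let vals := (PySem.Dict.mk statData).getD p.1 []
        (PySem.List.enumerate result).map (fun q => q.2 ++ [PySem.List.pyGetD vals q.1 ""]))
      ((PySem.List.enumerate statColumns).map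
        (fun fc => fc.2 :: us.map
          (fun p => PySem.List.pyGetD ((PySem.Dict.mk statData).getD p.1 []) fc.1 "")))
    = (PySem.List.enumerate statColumns).map
        (fun fc => fc.2 :: (us ++ ds).map
          (fun p => PySem.List.pyGetD ((PySem.Dict.mk statData).getD p.1 []) fc.1 "")) := by
  induction ds generalizing us with
  | nil => simp
  | cons d ds ih =>
    simp only [List.foldl_cons]
    rw [enum_map_aligned statColumns 0
      (fun fc => fc.2 :: us.map
        (fun p => PySem.List.pyGetD ((PySem.Dict.mk statData).getD p.1 []) fc.1 ""))
      (fun i => PySem.List.pyGetD ((PySem.Dict.mk statData).getD d.1 []) i "")]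
    have step : (PySem.List.enumerate statColumns).map
        (fun fc => (fc.2 :: us.map
            (fun p => PySem.List.pyGetD ((PySem.Dict.mk statData).getD p.1 []) fc.1 ""))
          ++ [PySem.List.pyGetD ((PySem.Dict.mk statData).getD d.1 []) fc.1 ""])
        = (PySem.List.enumerate statColumns).map
            (fun fc => fc.2 :: (us ++ [d]).map
              (fun p => PySem.List.pyGetD ((PySem.Dict.mk statData).getD p.1 []) fc.1 "")) := by
      refine List.map_congr_left (fun fc _ => ?_)
      simp
    rw [step, ih]
    simp

-- characterisation of B's result
theorem getB_eq (statColumns : List String) (statData : List (String × List String)) :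
    get_table_body_alt statColumns statData =
      (PySem.List.enumerate statColumns).map
        (fun fc => fc.2 :: statData.map
          (fun p => PySem.List.pyGetD ((PySem.Dict.mk statData).getD p.1 []) fc.1 "")) := by
  unfold get_table_body_alt
  rw [(map_over_enum_snd (fun c => [c]) statColumns 0).symm]
  have inv := getB_invariant statData statColumns statData []
  simpa using inv

-- ===== VERDICT (by name: the statement is the Claim_ definition above) =====
theorem get_table_body_spec : Claim_equal_get_table_body := by
  intro statColumns statData _ _
  unfold Spec_get_table_body
  rw [getA_eq, getB_eq]
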